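-- pv_equiv track=rewrite | github.com/PauloJuniorVitrine/Omni_Keywords_finder | scripts/validate_compliance.py | _generate_lgpd_recommendations
-- ===== SOURCE A (Python) =====
-- from typing import Dict, List, Any
--
-- def _generate_lgpd_recommendations(violations: List[str]) -> List[str]:
--     """Gera recomendações para LGPD"""
--     recommendations = []
--
--     if any("consent" in violation.lower() for violation in violations):
--         recommendations.append("Implementar sistema de consentimento explícito")
--
--     if any("data" in violation.lower() for violation in violations):
--         recommendations.append("Implementar proteção de dados pessoais")
--
--     if any("retention" in violation.lower() for violation in violations):
--         recommendations.append("Implementar política de retenção de dados")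
--
--     if not recommendations:
--         recommendations.append("Manter conformidade atual e monitorar regularmente")
--
--     return recommendations
-- ===== SOURCE B (Python) =====
-- from typing import List
--
-- def _generate_lgpd_recommendations(violations: List[str]) -> List[str]:
--     """Gera recomendações para LGPD (single-pass flag accumulation)."""
--     consent = data = retention = False
--     for v in violations:
--         lv = v.lower()
--         consent = consent or ("consent" in lv)
--         data = data or ("data" in lv)
--         retention = retention or ("retention" in lv)
--     recs = (
--         (["Implementar sistema de consentimento explícito"] if consent else [])
--         + (["Implementar proteção de dados pessoais"] if data else [])
--         + (["Implementar política de retenção de dados"] if retention else [])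
--     )
--     return recs if recs else ["Manter conformidade atual e monitorar regularmente"]
-- ===== Notes on version B (the rewrite author's own statement) =====
-- stated objective: faster
-- what changed: Replaced three separate any() scans over the violation list by a single pass that lowercases each violation once and accumulates three boolean flags, assembling the result list afterwards.
import Mathlib
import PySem

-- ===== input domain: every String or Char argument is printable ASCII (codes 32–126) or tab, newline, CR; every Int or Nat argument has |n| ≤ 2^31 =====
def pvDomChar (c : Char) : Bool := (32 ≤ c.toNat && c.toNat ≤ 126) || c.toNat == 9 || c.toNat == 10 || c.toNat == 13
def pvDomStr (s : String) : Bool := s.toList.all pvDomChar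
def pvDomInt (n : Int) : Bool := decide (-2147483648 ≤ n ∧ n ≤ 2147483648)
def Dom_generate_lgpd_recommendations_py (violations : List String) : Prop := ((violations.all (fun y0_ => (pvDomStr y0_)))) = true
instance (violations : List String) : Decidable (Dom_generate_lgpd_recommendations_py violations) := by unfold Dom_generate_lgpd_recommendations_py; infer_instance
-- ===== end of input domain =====

-- B replaces three separate any() scans by a single flag-accumulating pass; alternative decomposition, return value identical.


-- ===== PORT A =====
def generate_lgpd_recommendations_py (violations : List String) : List String :=
  let recommendations : List String := []
  let recommendations :=
    if violations.any (fun violation => PySem.Str.isIn "consent" (PySem.Str.lower violation)) then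
      recommendations ++ ["Implementar sistema de consentimento explícito"] else recommendations
  let recommendations :=
    if violations.any (fun violation => PySem.Str.isIn "data" (PySem.Str.lower violation)) then
      recommendations ++ ["Implementar proteção de dados pessoais"] else recommendations
  let recommendations :=
    if violations.any (fun violation => PySem.Str.isIn "retention" (PySem.Str.lower violation)) then
      recommendations ++ ["Implementar política de retenção de dados"] else recommendations
  if recommendations.isEmpty then
    recommendations ++ ["Manter conformidade atual e monitorar regularmente"]
  else recommendations

-- ===== PORT B =====
def generate_lgpd_recommendations_py_alt (violations : List String) : List String :=
  let flags := violations.foldl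
    (fun (f : Bool × Bool × Bool) v =>
      let lv := PySem.Str.lower v
      (f.1 || PySem.Str.isIn "consent" lv,
       f.2.1 || PySem.Str.isIn "data" lv,
       f.2.2 || PySem.Str.isIn "retention" lv))
    (false, false, false)
  let recs :=
    (if flags.1 then ["Implementar sistema de consentimento explícito"] else [])
    ++ (if flags.2.1 then ["Implementar proteção de dados pessoais"] else [])
    ++ (if flags.2.2 then ["Implementar política de retenção de dados"] else [])
  if recs.isEmpty then ["Manter conformidade atual e monitorar regularmente"] else recs

-- ===== PRECONDITION & SPEC =====
def Spec_generate_lgpd_recommendations_py (violations : List String) (out : List String) : Prop := out = generate_lgpd_recommendations_py_alt violations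
instance (violations : List String) (out : List String) : Decidable (Spec_generate_lgpd_recommendations_py violations out) := by unfold Spec_generate_lgpd_recommendations_py; infer_instance

-- ===== CLAIM (what is proved, stated in full; the proofs are below) =====
def Claim_equal_generate_lgpd_recommendations_py : Prop := ∀ (violations : List String), Dom_generate_lgpd_recommendations_py violations → Spec_generate_lgpd_recommendations_py violations (generate_lgpd_recommendations_py violations)

-- ===== LEMMAS AND PROOFS =====
theorem pv_foldl_flags (violations : List String) (a b c : Bool) :
    violations.foldl
      (fun (f : Bool × Bool × Bool) v =>
        let lv := PySem.Str.lower v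
        (f.1 || PySem.Str.isIn "consent" lv,
         f.2.1 || PySem.Str.isIn "data" lv,
         f.2.2 || PySem.Str.isIn "retention" lv))
      (a, b, c)
    = (a || violations.any (fun v => PySem.Str.isIn "consent" (PySem.Str.lower v)),
       b || violations.any (fun v => PySem.Str.isIn "data" (PySem.Str.lower v)),
       c || violations.any (fun v => PySem.Str.isIn "retention" (PySem.Str.lower v))) := by
  induction violations generalizing a b c with
  | nil => simp
  | cons x xs ih => rw [List.foldl_cons, ih]; simp [Bool.or_assoc]

-- ===== VERDICT (by name: the statement is the Claim_ definition above) =====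
theorem generate_lgpd_recommendations_py_spec : Claim_equal_generate_lgpd_recommendations_py := by
  intro violations _
  unfold Spec_generate_lgpd_recommendations_py
  unfold generate_lgpd_recommendations_py generate_lgpd_recommendations_py_alt
  rw [pv_foldl_flags]
  cases hc : violations.any (fun v => PySem.Str.isIn "consent" (PySem.Str.lower v)) <;>
  cases hd : violations.any (fun v => PySem.Str.isIn "data" (PySem.Str.lower v)) <;>
  cases hr : violations.any (fun v => PySem.Str.isIn "retention" (PySem.Str.lower v)) <;>
  simp
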